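-- pv_equiv track=rewrite | github.com/hyungmogu/ctci | pramp/algorithm/smallest_substring_of_all_characters/smallest_substring_of_all_characters.py | get_chrs_count
-- ===== SOURCE A (Python) =====
-- def get_chrs_count(temp_arr,temp_set):
--   output = {}
--   for character in temp_arr:
--     if character in temp_set and character in output:
--       output[character] += 1
--     elif (character in temp_set) and (not character in output):
--       output[character] = 1
--   return output
-- ===== SOURCE B (Python) =====
-- def get_chrs_count(temp_arr, temp_set):
--     # Count every character unconditionally in one pass, then keep only the
--     # members of temp_set (built once as a set).
--     counts = {}
--     for c in temp_arr:
--         counts[c] = counts.get(c, 0) + 1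
--     wanted = set(temp_set)
--     return {c: n for c, n in counts.items() if c in wanted}
-- ===== Notes on version B (the rewrite author's own statement) =====
-- stated objective: alternative
-- what changed: Instead of A's single pass that tests 'character in temp_set' before every dict update and branches on key presence, B counts all of temp_arr unconditionally in one pass and then filters the finished count dict through a set built once from temp_set.
import Mathlib
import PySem

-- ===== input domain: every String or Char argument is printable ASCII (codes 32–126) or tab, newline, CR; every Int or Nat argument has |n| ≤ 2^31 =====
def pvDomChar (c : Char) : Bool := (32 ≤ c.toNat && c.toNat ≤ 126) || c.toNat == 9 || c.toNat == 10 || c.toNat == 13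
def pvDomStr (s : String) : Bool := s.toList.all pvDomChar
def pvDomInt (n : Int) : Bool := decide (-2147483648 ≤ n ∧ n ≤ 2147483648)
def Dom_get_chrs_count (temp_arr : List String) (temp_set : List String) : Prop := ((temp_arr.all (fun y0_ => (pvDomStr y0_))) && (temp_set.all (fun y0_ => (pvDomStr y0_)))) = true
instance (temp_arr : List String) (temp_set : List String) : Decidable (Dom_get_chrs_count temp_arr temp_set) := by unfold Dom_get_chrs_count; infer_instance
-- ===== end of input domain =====

-- B counts all of temp_arr unconditionally in one pass and then filters the finished
-- count dict through a set built once from temp_set (alternative decomposition).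

-- ===== PORT A =====
-- A: one pass over temp_arr, branching on membership in temp_set and on key presence.
def get_chrs_count (temp_arr : List String) (temp_set : List String) : List (String × Int) :=
  (temp_arr.foldl
    (fun output character =>
      if temp_set.contains character && output.contains character then
        -- output[character] += 1
        match output.get? character with
        | some v => output.insert character (v + 1)
        | none => output
      else if temp_set.contains character && !output.contains character then
        output.insert character 1
      else output)
    (PySem.Dict.empty : PySem.Dict String Int)).items

-- ===== PORT B =====
-- B: counts = {}; for c: counts[c] = counts.get(c,0)+1; wanted = set(temp_set);
--    {c: n for c, n in counts.items() if c in wanted}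
def get_chrs_count_alt (temp_arr : List String) (temp_set : List String) : List (String × Int) :=
  let counts : PySem.Dict String Int :=
    temp_arr.foldl (fun d c => d.insert c (d.getD c 0 + 1)) PySem.Dict.empty
  let wanted : PySem.Set String := PySem.Set.ofList temp_set
  counts.items.filter (fun cn => PySem.Set.contains wanted cn.1)

-- ===== PRECONDITION & SPEC =====
def Spec_get_chrs_count (temp_arr : List String) (temp_set : List String) (out : List (String × Int)) : Prop := out = get_chrs_count_alt temp_arr temp_set
instance (temp_arr : List String) (temp_set : List String) (out : List (String × Int)) : Decidable (Spec_get_chrs_count temp_arr temp_set out) := by unfold Spec_get_chrs_count; infer_instance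

-- ===== CLAIM (what is proved, stated in full; the proofs are below) =====
def Claim_equal_get_chrs_count : Prop := ∀ (temp_arr : List String) (temp_set : List String), Dom_get_chrs_count temp_arr temp_set → Spec_get_chrs_count temp_arr temp_set (get_chrs_count temp_arr temp_set)

-- ===== LEMMAS AND PROOFS =====

-- A's loop body is, for every dict, 'if the char is in the set, bump its count'.
theorem body_eq (s : List String) (d : PySem.Dict String Int) (x : String) :
    (if s.contains x && d.contains x then
        match d.get? x with
        | some v => d.insert x (v + 1)
        | none => d
      else if s.contains x && !d.contains x then d.insert x 1
      else d)
    = (if s.contains x then d.insert x (d.getD x 0 + 1) else d) := by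
  cases hs : s.contains x <;>
    cases hd : d.get? x <;>
      simp_all [PySem.Dict.contains_eq_isSome_get?, PySem.Dict.getD]

theorem filter_add (s : List String) (x : String) (p : String → Bool) :
    (PySem.Set.add s x).filter p =
      if p x then PySem.Set.add (s.filter p) x else s.filter p := by
  simp [PySem.Set.add, PySem.Set.contains]
  split_ifs with h1 h2 h3 h2 <;> simp_all [List.filter_append]

theorem filter_foldl_add (xs : List String) (p : String → Bool) :
    ∀ s : List String, (xs.foldl PySem.Set.add s).filter p =
      (xs.filter p).foldl PySem.Set.add (s.filter p) := by
  induction xs with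
  | nil => intro s; rfl
  | cons x xs ih =>
    intro s
    simp only [List.foldl_cons, List.filter_cons]
    rw [ih, filter_add]
    split <;> simp

-- first-occurrence dedup commutes with filtering
theorem ofList_filter (xs : List String) (p : String → Bool) :
    PySem.Set.ofList (xs.filter p) = (PySem.List.dedup xs).filter p := by
  simp only [PySem.List.dedup_eq_ofList, PySem.Set.ofList_eq_foldl]
  rw [filter_foldl_add]
  rfl

-- ===== VERDICT (by name: the statement is the Claim_ definition above) =====
theorem get_chrs_count_spec : Claim_equal_get_chrs_count := by
  intro temp_arr temp_set _
  unfold Spec_get_chrs_count get_chrs_count get_chrs_count_alt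
  rw [PySem.List.foldl_congr_mem (l := temp_arr)
      (init := (PySem.Dict.empty : PySem.Dict String Int))
      (f := fun output character =>
        if temp_set.contains character && output.contains character then
          match output.get? character with
          | some v => output.insert character (v + 1)
          | none => output
        else if temp_set.contains character && !output.contains character then
          output.insert character 1
        else output)
      (g := fun d x =>
        if temp_set.contains x then d.insert x (d.getD x 0 + 1) else d)
      (fun d x _ => body_eq temp_set d x),
    PySem.List.foldl_ite_eq_foldl_filter,
    PySem.Dict.foldl_insert_getD_add_one_eq_counter,
    PySem.Dict.items_counter,
    ofList_filter]
  simp only [Bool.decide_eq_true]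
  rw [PySem.Dict.foldl_insert_getD_add_one_eq_counter, PySem.Dict.items_counter,
    List.filter_map]
  have hset : (fun cn : String × Int => PySem.Set.contains (PySem.Set.ofList temp_set) cn.1)
        ∘ (fun k => (k, (temp_arr.count k : Int)))
      = fun c => temp_set.contains c := by
    funext c
    simp [PySem.Set.contains, PySem.Set.mem_ofList]
  rw [hset, ← PySem.List.dedup_eq_ofList]
  refine List.map_congr_left ?_
  intro c hc
  have hp : temp_set.contains c = true := (List.mem_filter.mp hc).2
  rw [List.count_filter hp]
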